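-- pv_equiv track=rewrite | github.com/gutenburgb/Applied_Data_Science_Portfolio | referenced_deliverables/IST-664-natural-language-processing_ner_in_text_messages/data-and-code/extract_anonymize.py | dedupe_labels
-- ===== SOURCE A (Python) =====
-- def dedupe_labels(labels):
--     """
--     takes a list of dicts, dedupes on 'number' and prefers longer 'name' key
--     :param labels: list of dicts
--     :return: deduped list of dicts
--     """
--     new_labels = {}
--     for d in labels:
--         num = d['number']
--         name = d['name']
--         prior_name = new_labels.get(num, '')
--         if len(name) > len(prior_name):
--             new_labels[num] = name
--     return new_labels
-- ===== SOURCE B (Python) =====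
-- def dedupe_labels(labels):
--     """
--     takes a list of dicts, dedupes on 'number' and prefers longer 'name' key
--     :param labels: list of dicts
--     :return: deduped list of dicts
--     """
--     groups = {}
--     for d in labels:
--         groups.setdefault(d['number'], []).append(d['name'])
--     return {num: max(names, key=len) for num, names in groups.items()}
-- ===== Notes on version B (the rewrite author's own statement) =====
-- stated objective: alternative
-- what changed: A keeps one running dict and replaces a number's name whenever a strictly longer one arrives; B groups all names by number in one pass and then takes max(names, key=len) per group. Pre_ excludes lists in which some number's first occurrence carries an empty name: there A's key set and key order are insertion-order artefacts (a number whose names are all empty is silently dropped, and key order follows the first nonempty name rather than the first occurrence), while B keys every number at its first occurrence.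
-- outside the precondition, e.g. on dedupe_labels([{'number': '1', 'name': ''}]): A returns {}, B returns {'1': ''}
import Mathlib
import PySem

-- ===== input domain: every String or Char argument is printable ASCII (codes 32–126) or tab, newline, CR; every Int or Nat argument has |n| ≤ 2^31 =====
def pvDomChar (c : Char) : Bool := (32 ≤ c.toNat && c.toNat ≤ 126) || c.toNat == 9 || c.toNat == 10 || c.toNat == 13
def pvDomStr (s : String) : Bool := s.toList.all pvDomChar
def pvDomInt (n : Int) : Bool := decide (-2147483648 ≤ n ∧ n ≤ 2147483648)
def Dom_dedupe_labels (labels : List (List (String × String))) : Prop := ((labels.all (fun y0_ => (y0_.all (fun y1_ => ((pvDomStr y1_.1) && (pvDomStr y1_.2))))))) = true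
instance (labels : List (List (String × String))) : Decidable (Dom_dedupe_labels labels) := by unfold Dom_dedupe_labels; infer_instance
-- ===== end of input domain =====

-- B replaces A's single-pass strictly-longer replacement by a group-then-reduce decomposition:
-- it groups all names by number and then takes the first length-maximal name per group; same cost, different structure.

-- d[k] for a dict of strings: first match; the "" default is unreachable under Pre_ (KeyError is excluded there)
def pyKey (d : List (String × String)) (k : String) : String :=
  ((d.find? (fun p => p.1 == k)).map (·.2)).getD ""

-- ===== PORT A =====
def dedupe_labels (labels : List (List (String × String))) : List (String × String) :=
  (labels.foldl
    (fun (nl : PySem.Dict String String) d =>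
      let num := pyKey d "number"
      let name := pyKey d "name"
      let prior_name := nl.getD num ""
      if PySem.Str.len name > PySem.Str.len prior_name then nl.insert num name else nl)
    PySem.Dict.empty).items

-- ===== PORT B =====
def dedupe_labels_alt (labels : List (List (String × String))) : List (String × String) :=
  let groups := labels.foldl
    (fun (g : PySem.Dict String (List String)) d =>
      g.modify (pyKey d "number") [] (· ++ [pyKey d "name"]))
    PySem.Dict.empty
  groups.items.map (fun p => (p.1, (PySem.List.max? p.2 PySem.Str.len).getD ""))

-- ===== PRECONDITION & SPEC =====
-- first-occurrence check used by Pre_: every number's first occurrence carries a nonempty name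
def pvFirstOk : List (String × String) → List String → Bool
  | [], _ => true
  | p :: t, seen => (decide (p.1 ∈ seen) || p.2 != "") && pvFirstOk t (p.1 :: seen)

-- Pre_ excludes (a) inputs containing a dict without a 'number' or 'name' key, where A raises KeyError, and
-- (b) inputs in which some number's FIRST occurrence carries an empty name: there A's key set and key order are
-- insertion-order artefacts (a number whose names are all empty is dropped; key order follows the first nonempty
-- name rather than the first occurrence) — a corner where either behaviour is defensible.
def Pre_dedupe_labels (labels : List (List (String × String))) : Prop :=
  (∀ d ∈ labels, (d.any (fun p => p.1 == "number")) = true ∧ (d.any (fun p => p.1 == "name")) = true) ∧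
  pvFirstOk (labels.map (fun d => (pyKey d "number", pyKey d "name"))) [] = true
instance (labels : List (List (String × String))) : Decidable (Pre_dedupe_labels labels) := by
  unfold Pre_dedupe_labels; infer_instance
def pvWitness_dedupe_labels : (List (List (String × String))) :=
  [[("number", "1"), ("name", "ab")], [("number", "1"), ("name", "c")]]

def Spec_dedupe_labels (labels : List (List (String × String))) (out : List (String × String)) : Prop := out = dedupe_labels_alt labels
instance (labels : List (List (String × String))) (out : List (String × String)) : Decidable (Spec_dedupe_labels labels out) := by unfold Spec_dedupe_labels; infer_instance

-- ===== CLAIM (what is proved, stated in full; the proofs are below) =====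
def Claim_equal_dedupe_labels : Prop := ∀ (labels : List (List (String × String))), Dom_dedupe_labels labels → Pre_dedupe_labels labels → Spec_dedupe_labels labels (dedupe_labels labels)

-- ===== LEMMAS AND PROOFS =====

def pvStepA (nl : PySem.Dict String String) (p : String × String) : PySem.Dict String String :=
  if PySem.Str.len p.2 > PySem.Str.len (nl.getD p.1 "") then nl.insert p.1 p.2 else nl

def pvNums (t : List (String × String)) : List String :=
  (t.filter (fun p => p.2 != "")).map (·.1)

def pvNamesOf (t : List (String × String)) (num : String) : List String :=
  (t.filter (fun p => p.1 == num)).map (·.2)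

def pvBest (l : List String) : String :=
  l.foldl (fun b n => if PySem.Str.len b < PySem.Str.len n then n else b) ""

def pvCanon (t : List (String × String)) : List (String × String) :=
  (PySem.List.dedup (pvNums t)).map (fun num => (num, pvBest (pvNamesOf t num)))

-- generic facts
lemma pv_len_nonneg (s : String) : 0 ≤ PySem.Str.len s := by
  rw [PySem.Str.len_eq]; exact Int.natCast_nonneg _

lemma pv_len_zero (s : String) (h : PySem.Str.len s = 0) : s = "" := by
  rw [PySem.Str.len_eq] at h
  have h2 : s.toList = [] := by simpa using h
  simpa using congrArg String.ofList h2

lemma pv_dedup_concat (l : List String) (x : String) : PySem.List.dedup (l ++ [x]) =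
    if x ∈ l then PySem.List.dedup l else PySem.List.dedup l ++ [x] := by
  simp only [PySem.List.dedup_eq_ofList, PySem.Set.ofList_append, PySem.Set.update_cons,
    PySem.Set.update_nil, PySem.Set.add]
  by_cases h : x ∈ l
  · simp [h, PySem.Set.contains, PySem.Set.mem_ofList]
  · simp [h, PySem.Set.contains, PySem.Set.mem_ofList]

lemma pvBest_concat (l : List String) (n : String) :
    pvBest (l ++ [n]) = if PySem.Str.len (pvBest l) < PySem.Str.len n then n else pvBest l := by
  simp [pvBest, List.foldl_append]

lemma pvBest_all_empty (l : List String) (h : ∀ n ∈ l, n = "") : pvBest l = "" := by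
  induction l with
  | nil => rfl
  | cons a t ih =>
    have ha := h a (by simp)
    subst ha
    have : pvBest ("" :: t) = pvBest t := by simp [pvBest]
    rw [this]
    exact ih (fun n hn => h n (by simp [hn]))

lemma pvNums_concat (t : List (String × String)) (p : String × String) :
    pvNums (t ++ [p]) = pvNums t ++ (if p.2 = "" then [] else [p.1]) := by
  by_cases h : p.2 = "" <;> simp [pvNums, List.filter_append, h]

lemma pvNamesOf_concat (t : List (String × String)) (p : String × String) (m : String) :
    pvNamesOf (t ++ [p]) m = pvNamesOf t m ++ (if p.1 = m then [p.2] else []) := by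
  by_cases h : p.1 = m <;> simp [pvNamesOf, List.filter_append, h]

-- A characterization
lemma pvA_items (t : List (String × String)) :
    (t.foldl pvStepA PySem.Dict.empty).items = pvCanon t := by
  induction t using List.reverseRecOn with
  | nil => rfl
  | append_singleton t p ih =>
    rw [List.foldl_append, List.foldl_cons, List.foldl_nil]
    set D := t.foldl pvStepA PySem.Dict.empty with hD
    have hkeys : D.keys = PySem.List.dedup (pvNums t) := by
      simp only [PySem.Dict.keys, ih, pvCanon, List.map_map]
      simp [Function.comp_def]
    have hnodup : D.keys.Nodup := by rw [hkeys]; exact PySem.List.nodup_dedup _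
    have hgetD : D.getD p.1 "" = pvBest (pvNamesOf t p.1) := by
      by_cases hm : p.1 ∈ pvNums t
      · have hmem : (p.1, pvBest (pvNamesOf t p.1)) ∈ D.items := by
          rw [ih]
          exact List.mem_map_of_mem ((PySem.List.mem_dedup _ _).2 hm)
        exact PySem.Dict.getD_of_mem_items D hmem hnodup ""
      · have hc : D.contains p.1 = false := by
          rw [PySem.Dict.contains_eq_decide_mem_keys, hkeys]
          simp [hm]
        rw [PySem.Dict.getD_of_not_contains D "" hc]
        refine (pvBest_all_empty _ ?_).symm
        intro n hn
        by_contra hne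
        apply hm
        simp only [pvNamesOf, List.mem_map, List.mem_filter] at hn
        obtain ⟨q, ⟨hq, hq1⟩, hq2⟩ := hn
        simp only [pvNums, List.mem_map, List.mem_filter]
        exact ⟨q, ⟨hq, by simp [bne_iff_ne, hq2 ▸ hne]⟩, by simpa using hq1⟩
    have hcontains : D.contains p.1 = decide (p.1 ∈ pvNums t) := by
      rw [PySem.Dict.contains_eq_decide_mem_keys, hkeys]
      simp
    simp only [pvStepA, gt_iff_lt]
    by_cases hlt : PySem.Str.len (D.getD p.1 "") < PySem.Str.len p.2
    · have hne : p.2 ≠ "" := by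
        intro h0
        rw [h0] at hlt
        have := pv_len_nonneg (D.getD p.1 "")
        have h00 : PySem.Str.len "" = 0 := by rfl
        omega
      rw [if_pos hlt]
      by_cases hm : p.1 ∈ pvNums t
      · -- overwrite in place
        rw [PySem.Dict.items_insert_of_contains D p.2 (by rw [hcontains]; simp [hm])]
        rw [ih]
        simp only [pvCanon, pvNums_concat, if_neg hne, pv_dedup_concat, if_pos hm, List.map_map]
        apply List.map_congr_left
        intro m hmm
        by_cases hmeq : m = p.1
        · subst hmeq
          simp only [Function.comp_apply, BEq.rfl, if_true]
          rw [pvNamesOf_concat, if_pos rfl, pvBest_concat, ← hgetD, if_pos hlt]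
        · simp only [Function.comp_apply]
          rw [if_neg (by simpa using hmeq)]
          rw [pvNamesOf_concat, if_neg (fun h => hmeq h.symm)]
          simp
      · -- fresh key: append
        rw [PySem.Dict.items_insert_of_not_contains D p.2 (by rw [hcontains]; simp [hm])]
        rw [ih]
        simp only [pvCanon, pvNums_concat, if_neg hne, pv_dedup_concat, if_neg hm, List.map_append]
        congr 1
        · apply List.map_congr_left
          intro m hmm
          have hmnum : m ≠ p.1 := by
            intro h; subst h
            exact hm ((PySem.List.mem_dedup _ _).1 hmm)
          rw [pvNamesOf_concat, if_neg (fun h => hmnum h.symm)]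
          simp
        · simp only [List.map_cons, List.map_nil]
          rw [pvNamesOf_concat, if_pos rfl]
          have hall : pvBest (pvNamesOf t p.1) = "" := by
            rw [← hgetD]
            exact PySem.Dict.getD_of_not_contains D "" (by rw [hcontains]; simp [hm])
          rw [pvBest_concat, hall]
          rw [if_pos (by rw [← hall, ← hgetD]; exact hlt)]
    · rw [if_neg hlt]
      rw [ih]
      by_cases hne : p.2 = ""
      · simp only [pvCanon, pvNums_concat, if_pos hne, List.append_nil]
        apply List.map_congr_left
        intro m hmm
        rw [pvNamesOf_concat]
        by_cases hmeq : p.1 = m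
        · rw [if_pos hmeq, pvBest_concat, hne]
          rw [if_neg (by have := pv_len_nonneg (pvBest (pvNamesOf t m)); have h00 : PySem.Str.len "" = 0 := rfl; omega)]
        · rw [if_neg hmeq]; simp
      · have hpos : 0 < PySem.Str.len p.2 := by
          rcases lt_or_eq_of_le (pv_len_nonneg p.2) with h | h
          · exact h
          · exact absurd (pv_len_zero _ h.symm) hne
        have hm : p.1 ∈ pvNums t := by
          by_contra hm
          have hz : D.getD p.1 "" = "" := PySem.Dict.getD_of_not_contains D "" (by rw [hcontains]; simp [hm])
          rw [hz] at hlt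
          have h00 : PySem.Str.len "" = 0 := rfl
          omega
        simp only [pvCanon, pvNums_concat, if_neg hne, pv_dedup_concat, if_pos hm]
        apply List.map_congr_left
        intro m hmm
        rw [pvNamesOf_concat]
        by_cases hmeq : p.1 = m
        · subst hmeq
          rw [if_pos rfl, pvBest_concat, if_neg (hgetD ▸ hlt)]
        · rw [if_neg hmeq]; simp

lemma pv_max?_cons : ∀ (t : List String) (h : String),
    PySem.List.max? (h :: t) PySem.Str.len =
      some (t.foldl (fun b n => if PySem.Str.len b < PySem.Str.len n then n else b) h) := by
  intro t
  induction t with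
  | nil => intro h; rfl
  | cons a t ih =>
    intro h
    have step : PySem.List.max? (h :: a :: t) PySem.Str.len
        = PySem.List.max? ((if PySem.Str.len h < PySem.Str.len a then a else h) :: t) PySem.Str.len := by
      simp only [PySem.List.max?, List.foldl_cons]
      congr 1
      split <;> rfl
    rw [step, ih]
    simp only [List.foldl_cons]

lemma pvBest_eq_max? (l : List String) :
    pvBest l = (PySem.List.max? l PySem.Str.len).getD "" := by
  cases l with
  | nil => rfl
  | cons h t =>
    rw [pv_max?_cons t h, Option.getD_some]
    show List.foldl _ (if PySem.Str.len "" < PySem.Str.len h then h else "") t = _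
    congr 1
    by_cases hz : PySem.Str.len "" < PySem.Str.len h
    · rw [if_pos hz]
    · rw [if_neg hz]
      have h00 : PySem.Str.len "" = 0 := rfl
      have := pv_len_nonneg h
      exact (pv_len_zero h (by omega)).symm

-- pvFirstOk on an appended element
lemma pvFirstOk_concat : ∀ (t : List (String × String)) (p : String × String) (s : List String),
    pvFirstOk (t ++ [p]) s =
      (pvFirstOk t s && (decide (p.1 ∈ s) || decide (p.1 ∈ t.map (·.1)) || p.2 != "")) := by
  intro t
  induction t with
  | nil => intro p s; simp [pvFirstOk]
  | cons q t ih =>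
    intro p s
    simp only [List.cons_append, pvFirstOk, ih, List.map_cons, List.mem_cons]
    by_cases hqs : decide (q.1 ∈ s) || q.2 != ""
    · simp only [hqs, Bool.true_and]
      by_cases hp : p.1 = q.1
      · simp [hp]
      · simp [hp]
    · simp only [Bool.not_eq_true] at hqs
      simp [hqs]

-- under pvFirstOk, every number occurring in t (and not yet seen) has a nonempty name somewhere in t
lemma pvFirstOk_mem_nums : ∀ (t : List (String × String)) (s : List String),
    pvFirstOk t s = true → ∀ x, x ∈ t.map (·.1) → x ∉ s → x ∈ pvNums t := by
  intro t
  induction t with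
  | nil => intro s _ x hx; simp at hx
  | cons q t ih =>
    intro s hok x hx hxs
    simp only [pvFirstOk, Bool.and_eq_true] at hok
    obtain ⟨hq, hrest⟩ := hok
    simp only [List.map_cons, List.mem_cons] at hx
    by_cases hxq : x = q.1
    · subst hxq
      have hq2 : q.2 ≠ "" := by
        rcases Bool.or_eq_true_iff.1 hq with h | h
        · exact absurd (of_decide_eq_true h) hxs
        · simpa [bne_iff_ne] using h
      simp only [pvNums, List.mem_map, List.mem_filter]
      exact ⟨q, ⟨List.mem_cons_self, by simpa [bne_iff_ne] using hq2⟩, rfl⟩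
    · have hxt : x ∈ t.map (·.1) := by
        rcases hx with h | h
        · exact absurd h hxq
        · exact h
      have := ih (q.1 :: s) hrest x hxt (by simp [hxs, hxq])
      simp only [pvNums, List.mem_map, List.mem_filter] at this ⊢
      obtain ⟨r, ⟨hr, hr2⟩, hr1⟩ := this
      exact ⟨r, ⟨List.mem_cons_of_mem _ hr, hr2⟩, hr1⟩

lemma pv_mem_pvNums_sub (t : List (String × String)) (x : String) (h : x ∈ pvNums t) :
    x ∈ t.map (·.1) := by
  simp only [pvNums, List.mem_map, List.mem_filter] at h
  obtain ⟨q, ⟨hq, _⟩, hq1⟩ := h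
  exact List.mem_map.2 ⟨q, hq, hq1⟩

-- under Pre_'s first-occurrence condition, dedup of filtered nums = dedup of all nums
lemma pv_dedup_nums_eq (t : List (String × String)) (hok : pvFirstOk t [] = true) :
    PySem.List.dedup (pvNums t) = PySem.List.dedup (t.map (·.1)) := by
  induction t using List.reverseRecOn with
  | nil => rfl
  | append_singleton t p ih =>
    rw [pvFirstOk_concat, Bool.and_eq_true] at hok
    obtain ⟨hokt, hcond⟩ := hok
    have hmem_iff : p.1 ∈ pvNums t ↔ p.1 ∈ t.map (·.1) :=
      ⟨pv_mem_pvNums_sub t p.1,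
       fun h => pvFirstOk_mem_nums t [] hokt p.1 h (by simp)⟩
    by_cases hne : p.2 = ""
    · have hmem : p.1 ∈ t.map (·.1) := by
        rcases Bool.or_eq_true_iff.1 hcond with h | h
        · rcases Bool.or_eq_true_iff.1 h with h' | h'
          · simp at h'
          · exact of_decide_eq_true h'
        · simp [hne] at h
      rw [pvNums_concat, if_pos hne, List.append_nil, List.map_append]
      simp only [List.map_cons, List.map_nil]
      rw [pv_dedup_concat, if_pos hmem]
      exact ih hokt
    · rw [pvNums_concat, if_neg hne, List.map_append]
      simp only [List.map_cons, List.map_nil]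
      rw [pv_dedup_concat, pv_dedup_concat, ih hokt]
      by_cases hm : p.1 ∈ t.map (·.1)
      · rw [if_pos (hmem_iff.2 hm), if_pos hm]
      · rw [if_neg (fun h => hm (hmem_iff.1 h)), if_neg hm]

theorem pv_ports_eq (labels : List (List (String × String)))
    (hok : pvFirstOk (labels.map (fun d => (pyKey d "number", pyKey d "name"))) [] = true) :
    dedupe_labels labels = dedupe_labels_alt labels := by
  unfold dedupe_labels dedupe_labels_alt
  have hfa : (fun (nl : PySem.Dict String String) d =>
      let num := pyKey d "number"
      let name := pyKey d "name"
      let prior_name := nl.getD num ""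
      if PySem.Str.len name > PySem.Str.len prior_name then nl.insert num name else nl)
    = (fun nl d => pvStepA nl (pyKey d "number", pyKey d "name")) := rfl
  rw [hfa]
  rw [show labels.foldl (fun nl d => pvStepA nl (pyKey d "number", pyKey d "name")) PySem.Dict.empty
    = (labels.map (fun d => (pyKey d "number", pyKey d "name"))).foldl pvStepA PySem.Dict.empty
    from List.foldl_map.symm]
  set pairs := labels.map (fun d => (pyKey d "number", pyKey d "name")) with hpairs
  have hb : labels.foldl
      (fun (g : PySem.Dict String (List String)) d =>
        g.modify (pyKey d "number") [] (· ++ [pyKey d "name"])) PySem.Dict.empty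
    = pairs.foldl (fun (g : PySem.Dict String (List String)) p => g.modify p.1 [] (· ++ [p.2]))
        PySem.Dict.empty := by
    rw [hpairs, List.foldl_map]
  rw [hb]
  set groups := pairs.foldl
    (fun (g : PySem.Dict String (List String)) p => g.modify p.1 [] (· ++ [p.2]))
    PySem.Dict.empty with hgroups
  have hkeys : groups.keys = PySem.List.dedup (pairs.map (·.1)) := by
    rw [hgroups, PySem.Dict.keys_foldl_modify_key]
    simp [PySem.Dict.keys_empty, PySem.Set.update_nil_left, PySem.List.dedup_eq_ofList]
  have hnodup : groups.keys.Nodup := by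
    rw [hkeys]; exact PySem.List.nodup_dedup _
  have hgetD : ∀ num, groups.getD num [] = pvNamesOf pairs num := by
    intro num
    rw [hgroups, PySem.Dict.getD_foldl_modify_append, PySem.Dict.getD_empty]
    rfl
  rw [pvA_items pairs]
  show pvCanon pairs = groups.items.map (fun p => (p.1, (PySem.List.max? p.2 PySem.Str.len).getD ""))
  rw [PySem.Dict.items_eq_map_keys groups hnodup [], hkeys]
  rw [pvCanon, pv_dedup_nums_eq pairs hok, List.map_map]
  rw [List.map_map]
  apply List.map_congr_left
  intro num hnum
  simp only [Function.comp_apply]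
  rw [hgetD num, pvBest_eq_max?]

-- ===== VERDICT (by name: the statement is the Claim_ definition above) =====
theorem dedupe_labels_spec : Claim_equal_dedupe_labels := by
  intro labels _ hpre
  unfold Spec_dedupe_labels
  exact pv_ports_eq labels hpre.2
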